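-- pv_equiv track=rewrite | github.com/0P3R4T0R-Dev/EPR402 | My First Neural Network/NNFS Code Structure/Vectorized_Kernel.py | createPattern
-- ===== SOURCE A (Python) =====
-- def createPattern(kernelSize, input_Num_col):
--     Temp_pattern = []
--     for K in range(kernelSize):
--         for i in range(kernelSize):
--             Temp_pattern.append(1)
--         if K != kernelSize - 1:
--             for i in range(input_Num_col - kernelSize):
--                 Temp_pattern.append(0)
--     return Temp_pattern
-- ===== SOURCE B (Python) =====
-- def createPattern(kernelSize, input_Num_col):
--     ones = [1] * kernelSize
--     if kernelSize <= 1: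
--         return ones
--     zeros = [0] * (input_Num_col - kernelSize)
--     return (ones + zeros) * (kernelSize - 1) + ones
-- ===== Notes on version B (the rewrite author's own statement) =====
-- stated objective: simpler
-- what changed: Replaces the nested loops and the K != kernelSize-1 separator guard by closed-form list repetition: (ones+zeros) repeated kernelSize-1 times plus a trailing block of ones.
import Mathlib
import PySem

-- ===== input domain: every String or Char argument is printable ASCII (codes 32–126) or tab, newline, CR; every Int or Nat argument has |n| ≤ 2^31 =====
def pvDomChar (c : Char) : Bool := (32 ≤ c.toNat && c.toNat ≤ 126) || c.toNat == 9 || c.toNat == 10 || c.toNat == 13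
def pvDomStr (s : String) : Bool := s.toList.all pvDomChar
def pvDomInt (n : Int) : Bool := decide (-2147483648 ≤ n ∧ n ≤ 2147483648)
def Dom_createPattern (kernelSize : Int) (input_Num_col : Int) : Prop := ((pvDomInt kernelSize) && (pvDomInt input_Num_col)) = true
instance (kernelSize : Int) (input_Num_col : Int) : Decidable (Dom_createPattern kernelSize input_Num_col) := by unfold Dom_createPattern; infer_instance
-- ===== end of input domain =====

-- B replaces A's nested loops and the separator guard by closed-form list repetition (objective: simpler).

-- ===== PORT A =====
def createPattern (kernelSize : Int) (input_Num_col : Int) : List Int :=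
  (PySem.List.pyRange 0 kernelSize 1).foldl (fun acc K =>
    let acc := (PySem.List.pyRange 0 kernelSize 1).foldl (fun a _ => a ++ [(1 : Int)]) acc
    if K ≠ kernelSize - 1 then
      (PySem.List.pyRange 0 (input_Num_col - kernelSize) 1).foldl (fun a _ => a ++ [(0 : Int)]) acc
    else acc) []

-- ===== PORT B =====
-- [x]*n in Python is [] for n ≤ 0, hence List.replicate n.toNat
def createPattern_alt (kernelSize : Int) (input_Num_col : Int) : List Int :=
  let ones := List.replicate kernelSize.toNat (1 : Int)
  if kernelSize ≤ 1 then ones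
  else
    let zeros := List.replicate (input_Num_col - kernelSize).toNat (0 : Int)
    (List.replicate (kernelSize - 1).toNat (ones ++ zeros)).flatten ++ ones

-- ===== PRECONDITION & SPEC =====
def Spec_createPattern (kernelSize : Int) (input_Num_col : Int) (out : List Int) : Prop := out = createPattern_alt kernelSize input_Num_col
instance (kernelSize : Int) (input_Num_col : Int) (out : List Int) : Decidable (Spec_createPattern kernelSize input_Num_col out) := by unfold Spec_createPattern; infer_instance

-- ===== CLAIM (what is proved, stated in full; the proofs are below) =====
def Claim_equal_createPattern : Prop := ∀ (kernelSize : Int) (input_Num_col : Int), Dom_createPattern kernelSize input_Num_col → Spec_createPattern kernelSize input_Num_col (createPattern kernelSize input_Num_col)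

-- ===== LEMMAS AND PROOFS =====

-- the innermost append loops build a block of replicated constants
theorem foldl_append_const (l : List Int) (acc : List Int) (c : Int) :
    l.foldl (fun a _ => a ++ [c]) acc = acc ++ List.replicate l.length c := by
  induction l generalizing acc with
  | nil => simp
  | cons x xs ih => simp [ih, List.replicate_succ]

-- the outer loop, started at a ≤ kernelSize, appends (k-1-a) full (ones++zeros) units and a final ones block
theorem loop_eq (k n : Int) (m : Nat) : ∀ (a : Int) (acc : List Int), a ≤ k → m = (k - a).toNat →
    (PySem.List.pyRange a k 1).foldl (fun acc K =>
      let acc := (PySem.List.pyRange 0 k 1).foldl (fun a _ => a ++ [(1 : Int)]) acc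
      if K ≠ k - 1 then
        (PySem.List.pyRange 0 (n - k) 1).foldl (fun a _ => a ++ [(0 : Int)]) acc
      else acc) acc
    = acc ++ (List.replicate (k - 1 - a).toNat
        (List.replicate k.toNat (1 : Int) ++ List.replicate (n - k).toNat (0 : Int))).flatten ++
      (if a < k then List.replicate k.toNat (1 : Int) else []) := by
  induction m with
  | zero =>
    intro a acc ha hm
    have hak : a = k := by omega
    subst hak
    rw [PySem.List.pyRange_one_eq_nil le_rfl]
    simp
  | succ m ih =>
    intro a acc ha hm
    have hlt : a < k := by omega
    rw [PySem.List.pyRange_one_cons hlt]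
    simp only [List.foldl_cons]
    by_cases hlast : a = k - 1
    · -- last iteration: no zeros appended, and the recursive call is on the empty range
      subst hlast
      have hk : k - 1 + 1 = k := by omega
      rw [ih (k - 1 + 1) _ (by omega) (by omega)]
      simp only [hk]
      simp [PySem.List.length_pyRange_one, hlt]
    · -- middle iteration: ones then zeros appended, recurse
      rw [ih (a + 1) _ (by omega) (by omega)]
      have hrep : (k - 1 - a).toNat = (k - 1 - (a + 1)).toNat + 1 := by omega
      simp only [if_pos (show a + 1 < k by omega), if_pos hlt,
        foldl_append_const, PySem.List.length_pyRange_one, hrep, List.replicate_succ,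
        List.flatten_cons]
      simp [hlast]

-- ===== VERDICT (by name: the statement is the Claim_ definition above) =====
theorem createPattern_spec : Claim_equal_createPattern := by
  intro k n _
  unfold Spec_createPattern createPattern createPattern_alt
  by_cases hk : 0 < k
  · rw [loop_eq k n (k - 0).toNat 0 [] (by omega) rfl]
    by_cases hk1 : k ≤ 1
    · have h0 : (k - 1 - 0).toNat = 0 := by omega
      simp [hk, hk1, h0]
    · simp [hk, hk1]
  · rw [PySem.List.pyRange_one_eq_nil (by omega)]
    have h2 : k.toNat = 0 := by omega
    simp [show k ≤ 1 by omega, h2]
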